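-- pv_equiv track=rewrite | github.com/Amitro123/project-rules-generator | generator/skill_metadata_builder.py | generate_critical_rules
-- ===== SOURCE A (Python) =====
-- from typing import TYPE_CHECKING, List, Set
--
-- def generate_critical_rules(skill_name: str, tech_stack: List[str]) -> List[str]:
--     """Generate non-negotiable rules for the ## CRITICAL section (GAP-5)."""
--     rules: List[str] = [
--         "Read existing files before modifying them.",
--         "Run tests after any code change and verify they pass.",
--         "Never generate or reference file paths that don't exist in the project.",
--     ]
--
--     name_lower = skill_name.lower()
--     techs_lower = [t.lower() for t in tech_stack]
--
--     if any(x in name_lower or x in techs_lower for x in ("test", "pytest", "jest", "coverage")):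
--         rules.append("Never skip tests or suppress coverage with `--no-cov` / `--no-cover`.")
--
--     if any(x in name_lower or x in techs_lower for x in ("docker", "deploy", "kubernetes", "k8s")):
--         rules.append("Never deploy to production without confirming the target environment first.")
--
--     if any(x in name_lower or x in techs_lower for x in ("sql", "database", "postgres", "mysql", "mongo")):
--         rules.append("Never run destructive SQL (DROP, TRUNCATE, DELETE without WHERE) without a dry-run first.")
--
--     if any(x in name_lower or x in techs_lower for x in ("auth", "security", "oauth", "jwt")):
--         rules.append("Never log or expose secrets, tokens, or credentials in output.")
--
--     return rules
-- ===== SOURCE B (Python) =====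
-- BASE_RULES = [
--     "Read existing files before modifying them.",
--     "Run tests after any code change and verify they pass.",
--     "Never generate or reference file paths that don't exist in the project.",
-- ]
--
-- RULE_TEXTS = [
--     "Never skip tests or suppress coverage with `--no-cov` / `--no-cover`.",
--     "Never deploy to production without confirming the target environment first.",
--     "Never run destructive SQL (DROP, TRUNCATE, DELETE without WHERE) without a dry-run first.",
--     "Never log or expose secrets, tokens, or credentials in output.",
-- ]
--
-- KEYWORD_TO_RULE = {
--     "test": 0, "pytest": 0, "jest": 0, "coverage": 0,
--     "docker": 1, "deploy": 1, "kubernetes": 1, "k8s": 1,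
--     "sql": 2, "database": 2, "postgres": 2, "mysql": 2, "mongo": 2,
--     "auth": 3, "security": 3, "oauth": 3, "jwt": 3,
-- }
--
--
-- def generate_critical_rules(skill_name, tech_stack):
--     name_lower = skill_name.lower()
--     matched = set()
--     for t in tech_stack:
--         g = KEYWORD_TO_RULE.get(t.lower())
--         if g is not None:
--             matched.add(g)
--     for k, g in KEYWORD_TO_RULE.items():
--         if k in name_lower:
--             matched.add(g)
--     return BASE_RULES + [r for i, r in enumerate(RULE_TEXTS) if i in matched]
-- ===== Notes on version B (the rewrite author's own statement) =====
-- stated objective: alternative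
-- what changed: Inverts the lookup direction: instead of scanning four keyword groups against the name and tech list, B builds a keyword-to-rule-index dict once, collects a set of matched rule indices by one pass over the techs (dict lookup each) plus one pass over the dict keys (substring test against the name), then emits the rule texts whose index was matched.
import Mathlib
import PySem

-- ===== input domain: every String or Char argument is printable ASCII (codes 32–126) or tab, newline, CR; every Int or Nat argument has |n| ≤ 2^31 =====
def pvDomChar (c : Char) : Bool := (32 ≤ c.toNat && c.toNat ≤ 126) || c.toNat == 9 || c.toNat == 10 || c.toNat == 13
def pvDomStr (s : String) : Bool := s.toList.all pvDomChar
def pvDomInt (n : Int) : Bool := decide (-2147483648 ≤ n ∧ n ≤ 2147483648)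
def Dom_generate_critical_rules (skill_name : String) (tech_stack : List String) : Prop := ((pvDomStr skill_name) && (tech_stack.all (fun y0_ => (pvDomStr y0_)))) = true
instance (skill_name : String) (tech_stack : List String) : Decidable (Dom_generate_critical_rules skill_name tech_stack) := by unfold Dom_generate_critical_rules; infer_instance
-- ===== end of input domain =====

-- B inverts the lookup direction: a keyword→rule-index dict drives a matched-index set (per-tech dict lookup instead of per-group keyword scans); objective: alternative decomposition, same cost.


-- ===== PORT A =====
-- 'x in name_lower' is a substring test (PySem.Str.isIn); 'x in techs_lower' is list membership.
def generate_critical_rules (skill_name : String) (tech_stack : List String) : List String :=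
  let rules : List String := [
    "Read existing files before modifying them.",
    "Run tests after any code change and verify they pass.",
    "Never generate or reference file paths that don't exist in the project."]
  let name_lower := PySem.Str.lower skill_name
  let techs_lower := tech_stack.map PySem.Str.lower
  let rules := if (["test", "pytest", "jest", "coverage"].any
      (fun x => PySem.Str.isIn x name_lower || techs_lower.contains x)) then
    rules ++ ["Never skip tests or suppress coverage with `--no-cov` / `--no-cover`."] else rules
  let rules := if (["docker", "deploy", "kubernetes", "k8s"].any
      (fun x => PySem.Str.isIn x name_lower || techs_lower.contains x)) then
    rules ++ ["Never deploy to production without confirming the target environment first."] else rules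
  let rules := if (["sql", "database", "postgres", "mysql", "mongo"].any
      (fun x => PySem.Str.isIn x name_lower || techs_lower.contains x)) then
    rules ++ ["Never run destructive SQL (DROP, TRUNCATE, DELETE without WHERE) without a dry-run first."] else rules
  let rules := if (["auth", "security", "oauth", "jwt"].any
      (fun x => PySem.Str.isIn x name_lower || techs_lower.contains x)) then
    rules ++ ["Never log or expose secrets, tokens, or credentials in output."] else rules
  rules

-- ===== PORT B =====
def pvBaseRules : List String := [
  "Read existing files before modifying them.",
  "Run tests after any code change and verify they pass.",
  "Never generate or reference file paths that don't exist in the project."]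

def pvRuleTexts : List String := [
  "Never skip tests or suppress coverage with `--no-cov` / `--no-cover`.",
  "Never deploy to production without confirming the target environment first.",
  "Never run destructive SQL (DROP, TRUNCATE, DELETE without WHERE) without a dry-run first.",
  "Never log or expose secrets, tokens, or credentials in output."]

def pvKeywordToRule : PySem.Dict String Int := PySem.Dict.ofList [
  ("test", 0), ("pytest", 0), ("jest", 0), ("coverage", 0),
  ("docker", 1), ("deploy", 1), ("kubernetes", 1), ("k8s", 1),
  ("sql", 2), ("database", 2), ("postgres", 2), ("mysql", 2), ("mongo", 2),
  ("auth", 3), ("security", 3), ("oauth", 3), ("jwt", 3)]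

def generate_critical_rules_alt (skill_name : String) (tech_stack : List String) : List String :=
  let name_lower := PySem.Str.lower skill_name
  let matched : PySem.Set Int := tech_stack.foldl
    (fun s t => match pvKeywordToRule.get? (PySem.Str.lower t) with
      | some g => PySem.Set.add s g
      | none => s) PySem.Set.empty
  let matched := pvKeywordToRule.items.foldl
    (fun s p => if PySem.Str.isIn p.1 name_lower then PySem.Set.add s p.2 else s) matched
  pvBaseRules ++ ((PySem.List.enumerate pvRuleTexts).filter
    (fun p => PySem.Set.contains matched p.1)).map (fun p => p.2)

-- ===== PRECONDITION & SPEC =====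
def Spec_generate_critical_rules (skill_name : String) (tech_stack : List String) (out : List String) : Prop := out = generate_critical_rules_alt skill_name tech_stack
instance (skill_name : String) (tech_stack : List String) (out : List String) : Decidable (Spec_generate_critical_rules skill_name tech_stack out) := by unfold Spec_generate_critical_rules; infer_instance

-- ===== CLAIM (what is proved, stated in full; the proofs are below) =====
def Claim_equal_generate_critical_rules : Prop := ∀ (skill_name : String) (tech_stack : List String), Dom_generate_critical_rules skill_name tech_stack → Spec_generate_critical_rules skill_name tech_stack (generate_critical_rules skill_name tech_stack)

-- ===== LEMMAS AND PROOFS =====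

theorem mem_foldl_matchAdd {α : Type} (f : α → Option Int) (l : List α) (s0 : List Int) (x : Int) :
    x ∈ l.foldl (fun s t => match f t with
      | some g => PySem.Set.add s g
      | none => s) s0 ↔ x ∈ s0 ∨ ∃ t ∈ l, f t = some x := by
  induction l generalizing s0 with
  | nil => simp
  | cons a l ih =>
    simp only [List.foldl_cons, List.mem_cons]
    rw [ih]
    cases h : f a with
    | none => constructor
              · rintro (hs | ⟨t, ht, hf⟩)
                · tauto
                · exact Or.inr ⟨t, Or.inr ht, hf⟩
              · rintro (hs | ⟨t, (rfl | ht), hf⟩)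
                · tauto
                · rw [h] at hf; cases hf
                · exact Or.inr ⟨t, ht, hf⟩
    | some g =>
      simp only [PySem.Set.mem_add]
      constructor
      · rintro ((hs | rfl) | ⟨t, ht, hf⟩)
        · tauto
        · exact Or.inr ⟨a, Or.inl rfl, h⟩
        · exact Or.inr ⟨t, Or.inr ht, hf⟩
      · rintro (hs | ⟨t, (rfl | ht), hf⟩)
        · tauto
        · rw [h] at hf; exact Or.inl (Or.inr (Option.some.inj hf).symm)
        · exact Or.inr ⟨t, ht, hf⟩

theorem mem_foldl_ifAdd {α : Type} (c : α → Bool) (v : α → Int) (l : List α) (s0 : List Int) (x : Int) :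
    x ∈ l.foldl (fun s t => if c t then PySem.Set.add s (v t) else s) s0
      ↔ x ∈ s0 ∨ ∃ t ∈ l, c t = true ∧ v t = x := by
  induction l generalizing s0 with
  | nil => simp
  | cons a l ih =>
    simp only [List.foldl_cons]
    rw [ih]
    by_cases h : c a = true
    · simp only [h, if_true, PySem.Set.mem_add, List.mem_cons]
      constructor
      · rintro ((hs | rfl) | ⟨t, ht, hc, hv⟩)
        · tauto
        · exact Or.inr ⟨a, Or.inl rfl, h, rfl⟩
        · exact Or.inr ⟨t, Or.inr ht, hc, hv⟩
      · rintro (hs | ⟨t, (rfl | ht), hc, hv⟩)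
        · tauto
        · exact Or.inl (Or.inr hv.symm)
        · exact Or.inr ⟨t, ht, hc, hv⟩
    · rw [if_neg h]
      simp only [List.mem_cons]
      constructor
      · rintro (hs | ⟨t, ht, hc, hv⟩)
        · tauto
        · exact Or.inr ⟨t, Or.inr ht, hc, hv⟩
      · rintro (hs | ⟨t, (rfl | ht), hc, hv⟩)
        · tauto
        · exact absurd hc h
        · exact Or.inr ⟨t, ht, hc, hv⟩

theorem pv_nodup_keys : pvKeywordToRule.keys.Nodup := by decide

theorem pv_items : pvKeywordToRule.items = [
  ("test", (0:Int)), ("pytest", 0), ("jest", 0), ("coverage", 0),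
  ("docker", 1), ("deploy", 1), ("kubernetes", 1), ("k8s", 1),
  ("sql", 2), ("database", 2), ("postgres", 2), ("mysql", 2), ("mongo", 2),
  ("auth", 3), ("security", 3), ("oauth", 3), ("jwt", 3)] := rfl

theorem pv_mem_matched (nl : String) (ts : List String) (x : Int) :
    x ∈ (pvKeywordToRule.items.foldl
        (fun s p => if PySem.Str.isIn p.1 nl then PySem.Set.add s p.2 else s)
        (ts.foldl (fun s t => match pvKeywordToRule.get? (PySem.Str.lower t) with
          | some g => PySem.Set.add s g | none => s) PySem.Set.empty))
      ↔ (∃ t ∈ ts, pvKeywordToRule.get? (PySem.Str.lower t) = some x)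
        ∨ (∃ p ∈ pvKeywordToRule.items, PySem.Str.isIn p.1 nl = true ∧ p.2 = x) := by
  rw [mem_foldl_ifAdd (fun p => PySem.Str.isIn p.1 nl) Prod.snd,
      mem_foldl_matchAdd (fun t => pvKeywordToRule.get? (PySem.Str.lower t))]
  simp only [PySem.Set.empty, List.not_mem_nil, false_or]

theorem pv_get?_iff (s : String) (g : Int) :
    pvKeywordToRule.get? s = some g ↔ (s, g) ∈ pvKeywordToRule.items := by
  rw [PySem.Dict.get?_eq_some_iff_mem_items]
  exact pv_nodup_keys

-- ===== VERDICT (by name: the statement is the Claim_ definition above) =====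
theorem generate_critical_rules_spec : Claim_equal_generate_critical_rules := by
  intro n ts _
  show generate_critical_rules n ts = generate_critical_rules_alt n ts
  simp only [generate_critical_rules, generate_critical_rules_alt, pvBaseRules, pvRuleTexts]
  have hmm := pv_mem_matched (PySem.Str.lower n) ts
  have key : ∀ (g : Int) (grp : List String),
      (∀ s, (s, g) ∈ pvKeywordToRule.items ↔ s ∈ grp) →
      (∀ p ∈ pvKeywordToRule.items, p.2 = g → p.1 ∈ grp) →
      PySem.Set.contains (pvKeywordToRule.items.foldl
        (fun s p => if PySem.Str.isIn p.1 (PySem.Str.lower n) then PySem.Set.add s p.2 else s)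
        (ts.foldl (fun s t => match pvKeywordToRule.get? (PySem.Str.lower t) with
          | some gg => PySem.Set.add s gg | none => s) PySem.Set.empty)) g
      = grp.any (fun x => PySem.Str.isIn x (PySem.Str.lower n)
          || (ts.map PySem.Str.lower).contains x) := by
    intro g grp hgrp hback
    rw [Bool.eq_iff_iff]
    rw [show ∀ (l : List Int), (PySem.Set.contains l g = true) ↔ g ∈ l from
      fun l => by simp [PySem.Set.contains]]
    rw [hmm g]
    simp only [List.any_eq_true, Bool.or_eq_true, List.contains_iff_mem, List.mem_map,
      pv_get?_iff]
    constructor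
    · rintro (⟨t, ht, hmem⟩ | ⟨p, hp, hin, hpg⟩)
      · exact ⟨PySem.Str.lower t, (hgrp _).mp hmem, Or.inr ⟨t, ht, rfl⟩⟩
      · exact ⟨p.1, hback p hp hpg, Or.inl hin⟩
    · rintro ⟨x, hx, (hin | ⟨t, ht, rfl⟩)⟩
      · exact Or.inr ⟨(x, g), (hgrp x).mpr hx, hin, rfl⟩
      · exact Or.inl ⟨t, ht, (hgrp _).mpr hx⟩
  have k0 := key 0 ["test", "pytest", "jest", "coverage"]
        (by intro s; rw [pv_items]; simp)
        (by rw [pv_items]; intro p hp; fin_cases hp <;> simp)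
  have k1 := key 1 ["docker", "deploy", "kubernetes", "k8s"]
        (by intro s; rw [pv_items]; simp)
        (by rw [pv_items]; intro p hp; fin_cases hp <;> simp)
  have k2 := key 2 ["sql", "database", "postgres", "mysql", "mongo"]
        (by intro s; rw [pv_items]; simp)
        (by rw [pv_items]; intro p hp; fin_cases hp <;> simp)
  have k3 := key 3 ["auth", "security", "oauth", "jwt"]
        (by intro s; rw [pv_items]; simp)
        (by rw [pv_items]; intro p hp; fin_cases hp <;> simp)
  simp only [PySem.List.enumerate_cons, PySem.List.enumerate_nil, List.filter_cons,
    List.filter_nil, Int.reduceAdd, zero_add]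
  simp only [k0, k1, k2, k3]
  cases h1 : (["test", "pytest", "jest", "coverage"].any _) <;>
  cases h2 : (["docker", "deploy", "kubernetes", "k8s"].any _) <;>
  cases h3 : (["sql", "database", "postgres", "mysql", "mongo"].any _) <;>
  cases h4 : (["auth", "security", "oauth", "jwt"].any _) <;>
    simp
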